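-- pv_equiv track=rewrite | github.com/laranyeta/Reconeixement-Matricules | plate_ocr_recog.py | correct_plate_format
-- ===== SOURCE A (Python) =====
-- def correct_plate_format(text): #format 1234 BCD
--     if len(text) != 7:
--         return "No trobada"
--     corrected = ""
--
--     #corregeix els numeros (1-4) -> 4 digits
--     for i in range(4):
--         if text[i].isalpha() and text[i].upper() in ['L', 'S', 'G', 'B']:  # letras que confunden
--             if text[i].upper() == 'L':
--                 corrected += '4'
--             elif text[i].upper() == 'S':
--                 corrected += '5'
--             elif text[i].upper() == 'G':
--                 corrected += '6'
--             elif text[i].upper() == 'B':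
--                 corrected += '8'
--         else:
--             corrected += text[i]
--
--     #corregeix els caracters (4-7) -> 3 lletres
--     for i in range(3):
--         if text[i+4].isdigit() and text[i+4] in ['4', '5', '6', '8']: #a partir del index 4
--             map_num_to_letter = {'4': 'L', '5': 'S', '6': 'G', '8': 'B'}
--             corrected += map_num_to_letter.get(text[i+4], 'A')
--         else:
--             corrected += text[i+4].upper()
--
--     return corrected
-- ===== SOURCE B (Python) =====
-- # Single recursive pass over the index, with the confusable pairs held as two
-- # parallel letter/digit strings indexed with .index, instead of A's two
-- # staged loops with an if/elif chain and a dict.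
-- def correct_plate_format(text):  # format 1234 BCD
--     if len(text) != 7:
--         return "No trobada"
--     return _fix(text, 0)
--
-- def _fix(text, i):
--     if i == 7:
--         return ''
--     c = text[i]
--     if i < 4:
--         u = c.upper()
--         head = '4568'['LSGB'.index(u)] if u in 'LSGB' else c
--     else:
--         head = 'LSGB'['4568'.index(c)] if c in '4568' else c.upper()
--     return head + _fix(text, i + 1)
-- ===== Notes on version B (the rewrite author's own statement) =====
-- stated objective: alternative
-- what changed: Replaced A's two staged index loops with an if/elif chain plus a dict by a single recursive pass over the whole string that resolves each confusable via two parallel letter/digit strings indexed with .index, dropping A's redundant isalpha/isdigit checks.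
import Mathlib
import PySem

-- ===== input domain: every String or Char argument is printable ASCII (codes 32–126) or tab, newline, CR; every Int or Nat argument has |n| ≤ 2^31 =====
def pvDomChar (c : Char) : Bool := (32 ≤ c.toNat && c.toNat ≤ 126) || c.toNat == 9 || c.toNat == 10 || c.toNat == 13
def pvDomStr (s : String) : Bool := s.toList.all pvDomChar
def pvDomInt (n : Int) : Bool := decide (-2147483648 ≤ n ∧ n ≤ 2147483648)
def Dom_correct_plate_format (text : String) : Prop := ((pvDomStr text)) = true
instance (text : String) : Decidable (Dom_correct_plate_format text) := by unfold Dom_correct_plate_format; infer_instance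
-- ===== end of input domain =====

-- B replaces A's two staged loops (if/elif chain + dict) by one recursive pass resolving
-- confusables via two parallel letter/digit strings; objective: alternative, same cost.

-- ===== PORT A =====
-- one step of A's first loop body: the letter-to-digit if/elif chain (returns what is appended)
def pvAFix1 (c : Char) : List Char :=
  if PySem.Chars.isalpha c && ((PySem.Chars.upperChar c) ∈ ['L', 'S', 'G', 'B'] : Bool) then
    if PySem.Chars.upperChar c == 'L' then ['4']
    else if PySem.Chars.upperChar c == 'S' then ['5']
    else if PySem.Chars.upperChar c == 'G' then ['6']
    else if PySem.Chars.upperChar c == 'B' then ['8']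
    else []
  else [c]

-- one step of A's second loop body: the digit-to-letter dict lookup (returns what is appended)
def pvAFix2 (c : Char) : List Char :=
  if PySem.Chars.isdigit c && ((c ∈ ['4', '5', '6', '8'] : Bool)) then
    [PySem.Dict.getD (PySem.Dict.ofList [('4', 'L'), ('5', 'S'), ('6', 'G'), ('8', 'B')]) c 'A']
  else [PySem.Chars.upperChar c]

-- 'for i in range(4)' of A (text[i] is in range since len(text) = 7; none is unreachable)
def pvALoop1 (s : List Char) (acc : List Char) : List Char :=
  (PySem.List.pyRange 0 4 1).foldl
    (fun acc i =>
      match PySem.List.pyGet? s i with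
      | some c => acc ++ pvAFix1 c
      | none => acc) acc

-- 'for i in range(3)' of A, indexing text[i+4]
def pvALoop2 (s : List Char) (acc : List Char) : List Char :=
  (PySem.List.pyRange 0 3 1).foldl
    (fun acc i =>
      match PySem.List.pyGet? s (i + 4) with
      | some c => acc ++ pvAFix2 c
      | none => acc) acc

def correct_plate_format (text : String) : String :=
  if PySem.Str.len text ≠ 7 then "No trobada"
  else String.ofList (pvALoop2 text.toList (pvALoop1 text.toList []))

-- ===== PORT B =====
-- the head character _fix produces at position i < 4: "'4568'['LSGB'.index(u)] if u in 'LSGB' else c"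
def pvBHead1 (c : Char) : List Char :=
  let u := PySem.Chars.upperChar c
  if u ∈ ['L', 'S', 'G', 'B'] then [(['4', '5', '6', '8'].getD (['L', 'S', 'G', 'B'].idxOf u) 'A')]
  else [c]

-- the head character at position 4 ≤ i: "'LSGB'['4568'.index(c)] if c in '4568' else c.upper()"
def pvBHead2 (c : Char) : List Char :=
  if c ∈ ['4', '5', '6', '8'] then [(['L', 'S', 'G', 'B'].getD (['4', '5', '6', '8'].idxOf c) 'A')]
  else [PySem.Chars.upperChar c]

-- _fix(text, i): Python tests 'i == 7'; ported as 7 ≤ i for termination (only called with i ≤ 7).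
-- text[i] is in range for i < 7 since len(text) = 7; the none branch is unreachable.
def pvBFix (s : List Char) (i : Nat) : List Char :=
  if 7 ≤ i then []
  else
    match PySem.List.pyGet? s (i : Int) with
    | none => []
    | some c => (if i < 4 then pvBHead1 c else pvBHead2 c) ++ pvBFix s (i + 1)
termination_by 7 - i

def correct_plate_format_alt (text : String) : String :=
  if PySem.Str.len text ≠ 7 then "No trobada"
  else String.ofList (pvBFix text.toList 0)

-- ===== PRECONDITION & SPEC =====
def Spec_correct_plate_format (text : String) (out : String) : Prop := out = correct_plate_format_alt text
instance (text : String) (out : String) : Decidable (Spec_correct_plate_format text out) := by unfold Spec_correct_plate_format; infer_instance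

-- ===== CLAIM (what is proved, stated in full; the proofs are below) =====
def Claim_equal_correct_plate_format : Prop := ∀ (text : String), Dom_correct_plate_format text → Spec_correct_plate_format text (correct_plate_format text)

-- ===== LEMMAS AND PROOFS =====

-- per-character agreement of the two first-section mappings, on every domain character
theorem pvFix1_eq_bounded : ∀ n < 127, pvAFix1 (Char.ofNat n) = pvBHead1 (Char.ofNat n) := by decide

theorem pvFix1_eq (c : Char) (h : pvDomChar c = true) : pvAFix1 c = pvBHead1 c := by
  have hv : c.toNat < 127 := by
    unfold pvDomChar at h; simp only [Bool.or_eq_true, Bool.and_eq_true, decide_eq_true_eq,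
      beq_iff_eq] at h; omega
  have := pvFix1_eq_bounded c.toNat hv
  rwa [Char.ofNat_toNat] at this

-- per-character agreement of the two second-section mappings, on every domain character
theorem pvFix2_eq_bounded : ∀ n < 127, pvAFix2 (Char.ofNat n) = pvBHead2 (Char.ofNat n) := by decide

theorem pvFix2_eq (c : Char) (h : pvDomChar c = true) : pvAFix2 c = pvBHead2 c := by
  have hv : c.toNat < 127 := by
    unfold pvDomChar at h; simp only [Bool.or_eq_true, Bool.and_eq_true, decide_eq_true_eq,
      beq_iff_eq] at h; omega
  have := pvFix2_eq_bounded c.toNat hv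
  rwa [Char.ofNat_toNat] at this

-- ===== VERDICT (by name: the statement is the Claim_ definition above) =====
theorem correct_plate_format_spec : Claim_equal_correct_plate_format := by
  intro text hdom
  unfold Spec_correct_plate_format correct_plate_format correct_plate_format_alt
  have hlen : PySem.Str.len text = (text.toList.length : Int) := by
    simp [PySem.Str.len]
  by_cases h7 : text.toList.length = 7
  · -- length 7: name the seven characters and compare character by character
    rw [hlen, h7]
    simp only [ne_eq]
    obtain ⟨a, b, c, d, e, f, g, hs⟩ :
        ∃ a b c d e f g, text.toList = [a, b, c, d, e, f, g] := by
      match hm : text.toList, h7 with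
      | [a, b, c, d, e, f, g], _ => exact ⟨a, b, c, d, e, f, g, rfl⟩
    have hall : pvDomChar a ∧ pvDomChar b ∧ pvDomChar c ∧ pvDomChar d ∧
        pvDomChar e ∧ pvDomChar f ∧ pvDomChar g := by
      have := hdom
      unfold Dom_correct_plate_format pvDomStr at this
      rw [hs] at this
      simpa using this
    obtain ⟨ha, hb, hc, hd, he, hf, hg⟩ := hall
    rw [hs]
    have hr4 : PySem.List.pyRange 0 4 1 = [0, 1, 2, 3] := by decide
    have hr3 : PySem.List.pyRange 0 3 1 = [0, 1, 2] := by decide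
    unfold pvALoop1 pvALoop2
    rw [hr4, hr3]
    rw [show (0:Nat) = 0 from rfl]
    rw [pvBFix, pvBFix, pvBFix, pvBFix, pvBFix, pvBFix, pvBFix, pvBFix]
    simp only [List.foldl_cons, List.foldl_nil, PySem.List.pyGet?, PySem.List.pyIdx?]
    simp [pvFix1_eq a ha, pvFix1_eq b hb, pvFix1_eq c hc, pvFix1_eq d hd,
      pvFix2_eq e he, pvFix2_eq f hf, pvFix2_eq g hg]
  · rw [hlen]
    have h7' : ((text.toList.length : Int)) ≠ 7 := by exact_mod_cast h7
    simp only [ne_eq, h7', not_false_eq_true, if_true]
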